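-- pv_equiv track=rewrite | github.com/zhiming-xu/Q-Filter | ProjectDemo/interface.py | trans_data
-- ===== SOURCE A (Python) =====
-- def trans_data(dataset):
--     train_num = int(0.7*len(dataset))
--     data, label = [], []
--     for pair in dataset:
--         data.append(pair[0])
--         label.append(pair[1])
--     train_data = data[:train_num], label[:train_num]
--     test_data = data[train_num:], label[train_num:]
--     return train_data, test_data
-- ===== SOURCE B (Python) =====
-- def trans_data(dataset):
--     train_num = int(0.7 * len(dataset))
--     train_pairs = dataset[:train_num]
--     test_pairs = dataset[train_num:]
--     train_data_list, train_label_list = [], []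
--     for pair in train_pairs:
--         train_data_list.append(pair[0])
--         train_label_list.append(pair[1])
--     test_data_list, test_label_list = [], []
--     for pair in test_pairs:
--         test_data_list.append(pair[0])
--         test_label_list.append(pair[1])
--     return (train_data_list, train_label_list), (test_data_list, test_label_list)
-- ===== Notes on version B (the rewrite author's own statement) =====
-- stated objective: alternative
-- what changed: B slices the raw dataset into train/test halves first and then unzips each half in its own loop, instead of A's single unzip loop over the whole dataset followed by four list slices.
import Mathlib
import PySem

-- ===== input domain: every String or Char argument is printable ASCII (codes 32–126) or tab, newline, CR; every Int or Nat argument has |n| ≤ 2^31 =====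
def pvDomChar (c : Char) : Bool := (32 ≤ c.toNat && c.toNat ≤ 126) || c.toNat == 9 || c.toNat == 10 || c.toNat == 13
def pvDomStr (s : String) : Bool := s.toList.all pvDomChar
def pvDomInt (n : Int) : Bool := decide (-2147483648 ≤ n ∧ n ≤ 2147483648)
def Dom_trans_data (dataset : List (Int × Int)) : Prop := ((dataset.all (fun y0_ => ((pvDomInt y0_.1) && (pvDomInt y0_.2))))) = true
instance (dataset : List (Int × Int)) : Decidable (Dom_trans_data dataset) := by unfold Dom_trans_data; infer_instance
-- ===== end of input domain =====

-- B slices the dataset into train/test halves first and unzips each half in its own loop,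
-- instead of A's single unzip loop over the whole dataset followed by four slices (objective: alternative decomposition).

-- int(0.7*n) computed exactly as CPython does: 0.7 is the IEEE double 0x16666666666666/2^53;
-- the float product 0.7*n is that integer product rounded to 53 significant bits (round-to-nearest,
-- ties-to-even), and int() then truncates (floors, since n ≥ 0). Exact on all n (shared by both ports,
-- since both Pythons contain the identical expression int(0.7*len(dataset))).
def pyTrainNum (n : Nat) : Nat :=
  let p := 6305039478318694 * n
  if p = 0 then 0
  else
    let bl := Nat.log2 p + 1
    if bl ≤ 53 then 0
    else
      let e := bl - 53
      let q := p / 2 ^ e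
      let r := p % 2 ^ e
      let half := 2 ^ (e - 1)
      let q' := if half < r ∨ (r = half ∧ q % 2 = 1) then q + 1 else q
      q' * 2 ^ e / 2 ^ 53

-- ===== PORT A =====
def trans_data (dataset : List (Int × Int)) : (List Int × List Int) × (List Int × List Int) :=
  let train_num : Nat := pyTrainNum dataset.length
  let dl := dataset.foldl (fun acc pair => (acc.1 ++ [pair.1], acc.2 ++ [pair.2])) (([] : List Int), ([] : List Int))
  let train_data := (PySem.List.slice dl.1 none (some (train_num : Int)), PySem.List.slice dl.2 none (some (train_num : Int)))
  let test_data := (PySem.List.slice dl.1 (some (train_num : Int)) none, PySem.List.slice dl.2 (some (train_num : Int)) none)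
  (train_data, test_data)

-- ===== PORT B =====
def pvUnzipLoop (pairs : List (Int × Int)) : List Int × List Int :=
  pairs.foldl (fun acc pair => (acc.1 ++ [pair.1], acc.2 ++ [pair.2])) (([] : List Int), ([] : List Int))

def trans_data_alt (dataset : List (Int × Int)) : (List Int × List Int) × (List Int × List Int) :=
  let train_num : Nat := pyTrainNum dataset.length
  let train_pairs := PySem.List.slice dataset none (some (train_num : Int))
  let test_pairs := PySem.List.slice dataset (some (train_num : Int)) none
  (pvUnzipLoop train_pairs, pvUnzipLoop test_pairs)

-- ===== PRECONDITION & SPEC =====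
def Spec_trans_data (dataset : List (Int × Int)) (out : (List Int × List Int) × (List Int × List Int)) : Prop := out = trans_data_alt dataset
instance (dataset : List (Int × Int)) (out : (List Int × List Int) × (List Int × List Int)) : Decidable (Spec_trans_data dataset out) := by unfold Spec_trans_data; infer_instance

-- ===== CLAIM (what is proved, stated in full; the proofs are below) =====
def Claim_equal_trans_data : Prop := ∀ (dataset : List (Int × Int)), Dom_trans_data dataset → Spec_trans_data dataset (trans_data dataset)

-- ===== LEMMAS AND PROOFS =====

theorem unzip_foldl (pairs : List (Int × Int)) (a b : List Int) :
    pairs.foldl (fun acc pair => (acc.1 ++ [pair.1], acc.2 ++ [pair.2])) (a, b)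
      = (a ++ pairs.map Prod.fst, b ++ pairs.map Prod.snd) := by
  induction pairs generalizing a b with
  | nil => simp
  | cons p ps ih => simp [List.foldl, ih]

theorem pvUnzipLoop_eq (pairs : List (Int × Int)) :
    pvUnzipLoop pairs = (pairs.map Prod.fst, pairs.map Prod.snd) := by
  simp [pvUnzipLoop, unzip_foldl]

-- ===== VERDICT (by name: the statement is the Claim_ definition above) =====
theorem trans_data_spec : Claim_equal_trans_data := by
  intro ds _
  unfold Spec_trans_data trans_data trans_data_alt
  simp only [unzip_foldl, pvUnzipLoop_eq, List.nil_append,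
    PySem.List.slice_to_natCast, PySem.List.slice_from_natCast,
    List.map_take, List.map_drop]
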